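-- pv_equiv track=rewrite | github.com/abaek/Algorithms | ArraysAndStrings_(Solutions).py | continguousString
-- ===== SOURCE A (Python) =====
-- def continguousString(listStr, str):
-- 	L = len(listStr[0])
-- 	m = len(listStr)
-- 	n = len(str)
-- 	setStrings = set()
-- 	#add each listStr into set
-- 	for i in range(m):
-- 		setStrings.add(listStr[i])
-- 	#keep track of longest length and longest string
-- 	longestLength = 0
-- 	longestString = ''
-- 	#go through the long str L times
-- 	for i in range(L):
-- 		curLength = 0
-- 		curString = ''
-- 		#loop through every L'th position starting from i
-- 		for j in range(i, (n-L), L):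
-- 			#check if substring in set
-- 			if str[j:j+L] in setStrings:
-- 				curLength += 1
-- 				curString += str[j:(j+L)]
-- 				#set new longest string
-- 				if curLength > longestLength:
-- 					longestLength = curLength
-- 					longestString = curString
-- 			else:
-- 				curLength = 0
-- 				curString = ''
-- 	return longestString
-- ===== SOURCE B (Python) =====
-- def continguousString(listStr, str):
--     L = len(listStr[0])
--     words = set(listStr)
--     n = len(str)
--     best_len = 0
--     best_str = ''
--     for i in range(L):
--         # table pass: the aligned chunks at this offset and which of them are words
--         chunks = [str[j:j+L] for j in range(i, (n - L), L)]
--         flags = [c in words for c in chunks]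
--         pairs = list(zip(flags, chunks))
--         # run pass: jump run by run; a run longer than the best so far replaces it
--         p = 0
--         while p < len(pairs):
--             if pairs[p][0]:
--                 q = p
--                 while q < len(pairs) and pairs[q][0]:
--                     q += 1
--                 if q - p > best_len:
--                     best_len = q - p
--                     best_str = ''.join(c for _, c in pairs[p:q])
--                 p = q
--             else:
--                 p += 1
--     return best_str
-- ===== Notes on version B (the rewrite author's own statement) =====
-- stated objective: alternative
-- what changed: A threads a 4-part running state (current run length/string and best) through one nested loop, updating the best mid-run and growing the run string character-chunk by chunk; B first builds a table of aligned chunks and membership flags per offset, then a separate run-scan pass jumps run by run (two inner pointers), comparing each whole maximal run against the best once and rebuilding the best string by joining the run's chunks.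
import Mathlib
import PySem

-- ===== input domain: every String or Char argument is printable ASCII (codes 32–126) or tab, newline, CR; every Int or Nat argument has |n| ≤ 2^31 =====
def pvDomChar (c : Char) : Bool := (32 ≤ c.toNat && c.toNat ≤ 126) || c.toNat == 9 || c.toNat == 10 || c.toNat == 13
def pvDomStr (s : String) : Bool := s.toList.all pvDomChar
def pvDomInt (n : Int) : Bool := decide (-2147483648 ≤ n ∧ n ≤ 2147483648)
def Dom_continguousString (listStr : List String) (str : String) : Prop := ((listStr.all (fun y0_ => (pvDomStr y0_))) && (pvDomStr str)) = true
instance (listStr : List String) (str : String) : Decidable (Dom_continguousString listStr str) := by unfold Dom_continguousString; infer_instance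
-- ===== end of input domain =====

-- B replaces A's single nested loop with a 4-part running state by a per-offset table of
-- chunks/flags and a separate run-by-run scan; same cost, different decomposition (objective: alternative).
-- Strings are handled on the List Char side throughout (exact; Lean's own String.append is kernel-opaque).

-- ===== PORT A =====
-- the body of A's inner loop: state (curLength, curString, longestLength, longestString),
-- w is the slice str[j:j+L] computed at this step
def pvAStep (setStrings : PySem.Set (List Char)) (q : Int × List Char × Int × List Char)
    (w : List Char) : Int × List Char × Int × List Char :=
  if PySem.Set.contains setStrings w then
    let curLength := q.1 + 1
    let curString := q.2.1 ++ w
    if curLength > q.2.2.1 then (curLength, curString, curLength, curString)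
    else (curLength, curString, q.2.2.1, q.2.2.2)
  else (0, [], q.2.2.1, q.2.2.2)

-- one iteration of A's outer loop (over the offset i), carrying (longestLength, longestString)
def pvAOff (setStrings : PySem.Set (List Char)) (cs : List Char) (L n : Int)
    (st : Int × List Char) (i : Int) : Int × List Char :=
  let inner :=
    (PySem.List.pyRange i (n - L) L).foldl
      (fun q j => pvAStep setStrings q (PySem.List.slice cs (some j) (some (j + L))))
      (0, [], st.1, st.2)
  (inner.2.2.1, inner.2.2.2)

def continguousString (listStr : List String) (str : String) : String :=
  match PySem.List.pyGet? listStr 0 with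
  | none => ""            -- Python raises IndexError (listStr[0]) here; excluded by Pre_
  | some first =>
    let L : Int := PySem.Str.len first
    let m : Int := (listStr.length : Int)
    let n : Int := PySem.Str.len str
    -- for i in range(m): setStrings.add(listStr[i])
    let setStrings : PySem.Set (List Char) :=
      (PySem.List.pyRange 0 m 1).foldl
        (fun s i => PySem.Set.add s (PySem.List.pyGetD listStr i "").toList) PySem.Set.empty
    -- for i in range(L): for j in range(i, n-L, L): …
    let res : Int × List Char :=
      (PySem.List.pyRange 0 L 1).foldl (pvAOff setStrings str.toList L n) (0, "".toList)
    String.ofList res.2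

-- ===== PORT B =====
-- B's run pass: the Python while-loop walks an index p over `pairs`; here we recurse on the
-- suffix of `pairs` directly — the inner `while q …` counting a run is the takeWhile block
-- `pairs[p:q]` (the element at p plus the following flagged ones), and `p = q` is dropWhile.
def pvRunScan (pairs : List (Bool × List Char)) (st : Int × List Char) : Int × List Char :=
  match pairs with
  | [] => st
  | (f, c) :: rest =>
    if f then
      let blk := (f, c) :: rest.takeWhile (fun p => p.1)
      let st' := if (blk.length : Int) > st.1
                 then ((blk.length : Int), (blk.map (fun p => p.2)).flatten)
                 else st
      pvRunScan (rest.dropWhile (fun p => p.1)) st'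
    else pvRunScan rest st
termination_by pairs.length
decreasing_by
  · exact Nat.lt_succ_of_le (List.length_dropWhile_le _ _)
  · simp

-- one iteration of B's outer loop: build the chunk/flag table, then scan it run by run
def pvBOff (words : PySem.Set (List Char)) (cs : List Char) (L n : Int)
    (st : Int × List Char) (i : Int) : Int × List Char :=
  let chunks := (PySem.List.pyRange i (n - L) L).map
    (fun j => PySem.List.slice cs (some j) (some (j + L)))
  let flags := chunks.map (fun c => PySem.Set.contains words c)
  let pairs := flags.zip chunks
  pvRunScan pairs st

def continguousString_alt (listStr : List String) (str : String) : String :=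
  match PySem.List.pyGet? listStr 0 with
  | none => ""            -- Python raises IndexError (listStr[0]) here; excluded by Pre_
  | some first =>
    let L : Int := PySem.Str.len first
    let words : PySem.Set (List Char) := PySem.Set.ofList (listStr.map String.toList)
    let n : Int := PySem.Str.len str
    let res : Int × List Char :=
      (PySem.List.pyRange 0 L 1).foldl (pvBOff words str.toList L n) (0, "".toList)
    String.ofList res.2

-- ===== PRECONDITION & SPEC =====
-- Pre_ excludes only the empty word list, on which the Python A (and B alike) raises IndexError at listStr[0].
def Pre_continguousString (listStr : List String) (str : String) : Prop := listStr ≠ []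
instance (listStr : List String) (str : String) : Decidable (Pre_continguousString listStr str) := by
  unfold Pre_continguousString; infer_instance
def pvWitness_continguousString : List String × String := (["ab"], "ababx")

def Spec_continguousString (listStr : List String) (str : String) (out : String) : Prop := out = continguousString_alt listStr str
instance (listStr : List String) (str : String) (out : String) : Decidable (Spec_continguousString listStr str out) := by unfold Spec_continguousString; infer_instance

-- ===== CLAIM (what is proved, stated in full; the proofs are below) =====
def Claim_equal_continguousString : Prop := ∀ (listStr : List String) (str : String), Dom_continguousString listStr str → Pre_continguousString listStr str → Spec_continguousString listStr str (continguousString listStr str)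

-- ===== LEMMAS AND PROOFS =====

theorem pvRunScan_nil (st : Int × List Char) : pvRunScan [] st = st := by
  simp [pvRunScan]

theorem pvRunScan_cons_false (c : List Char) (rest : List (Bool × List Char))
    (st : Int × List Char) : pvRunScan ((false, c) :: rest) st = pvRunScan rest st := by
  simp [pvRunScan]

theorem pvRunScan_cons_true (c : List Char) (rest : List (Bool × List Char))
    (st : Int × List Char) :
    pvRunScan ((true, c) :: rest) st =
      pvRunScan (rest.dropWhile (fun p => p.1))
        (if ((((true, c) :: rest.takeWhile (fun p => p.1)).length : Int)) > st.1
         then ((((true, c) :: rest.takeWhile (fun p => p.1)).length : Int),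
               (((true, c) :: rest.takeWhile (fun p => p.1)).map (fun p => p.2)).flatten)
         else st) := by
  rw [pvRunScan]
  simp

-- A's inner loop across a block of chunks that are all in the set: the run grows by the whole
-- block, and the best is replaced exactly when the final run length beats it (for a nonempty block).
theorem pvAStep_block (S : PySem.Set (List Char)) (ws : List (List Char))
    (hws : ∀ w ∈ ws, PySem.Set.contains S w = true) (c : Int) (s : List Char) (b : Int) (t : List Char) :
    ws.foldl (pvAStep S) (c, s, b, t) =
      (c + (ws.length : Int), s ++ ws.flatten,
       if b < c + (ws.length : Int) ∧ ws ≠ [] then c + (ws.length : Int) else b,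
       if b < c + (ws.length : Int) ∧ ws ≠ [] then s ++ ws.flatten else t) := by
  induction ws generalizing c s b t with
  | nil => simp
  | cons w tl ih =>
    have hw : PySem.Set.contains S w = true := hws w (List.mem_cons_self ..)
    have htl : ∀ x ∈ tl, PySem.Set.contains S x = true := fun x hx => hws x (List.mem_cons_of_mem _ hx)
    have hlen : ((w :: tl).length : Int) = (tl.length : Int) + 1 := by
      push_cast [List.length_cons]; ring
    have hstep : pvAStep S (c, s, b, t) w =
        (c + 1, s ++ w, if b < c + 1 then c + 1 else b, if b < c + 1 then s ++ w else t) := by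
      unfold pvAStep
      rw [hw]
      by_cases hb1 : b < c + 1 <;> simp [hb1]
    rw [List.foldl_cons, hstep]
    by_cases hb1 : b < c + 1
    · rw [if_pos hb1, if_pos hb1, ih htl]
      by_cases hnil : tl = []
      · subst hnil
        have hc2 : b < c + (([w] : List (List Char)).length : Int) ∧ ([w] : List (List Char)) ≠ [] := by
          refine ⟨?_, by simp⟩
          simp only [List.length_cons, List.length_nil]
          push_cast
          omega
        rw [if_neg (by simp), if_neg (by simp), if_pos hc2, if_pos hc2]
        simp only [Prod.mk.injEq, List.flatten_cons, List.flatten_nil, List.append_nil,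
          List.length_cons, List.length_nil]
        and_intros <;> first | rfl | trivial | (push_cast; ring)
      · have hl : 0 < (tl.length : Int) := by
          exact_mod_cast List.length_pos_iff.mpr hnil
        have hc1 : (c + 1 : Int) < c + 1 + (tl.length : Int) ∧ tl ≠ [] := ⟨by omega, hnil⟩
        have hc2 : b < c + ((w :: tl).length : Int) ∧ (w :: tl) ≠ [] :=
          ⟨by rw [hlen]; omega, by simp⟩
        rw [if_pos hc1, if_pos hc2, if_pos hc1, if_pos hc2]
        simp only [Prod.mk.injEq, List.flatten_cons, List.append_assoc]
        and_intros <;> first | rfl | trivial | (rw [hlen]; ring)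
    · rw [if_neg hb1, if_neg hb1, ih htl]
      have hciff : ((b : Int) < c + 1 + (tl.length : Int) ∧ tl ≠ []) ↔
          (b < c + ((w :: tl).length : Int) ∧ (w :: tl) ≠ []) := by
        constructor
        · rintro ⟨h, _⟩; exact ⟨by rw [hlen]; omega, by simp⟩
        · rintro ⟨h, _⟩
          rw [hlen] at h
          refine ⟨by omega, ?_⟩
          intro hnil
          subst hnil
          simp only [List.length_nil, Nat.cast_zero] at h
          omega
      by_cases hcond : (b : Int) < c + 1 + (tl.length : Int) ∧ tl ≠ []
      · rw [if_pos hcond, if_pos (hciff.mp hcond), if_pos hcond, if_pos (hciff.mp hcond)]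
        simp only [Prod.mk.injEq, List.flatten_cons, List.append_assoc]
        and_intros <;> first | rfl | trivial | (rw [hlen]; ring)
      · rw [if_neg hcond, if_neg (fun h => hcond (hciff.mpr h)),
          if_neg hcond, if_neg (fun h => hcond (hciff.mpr h))]
        simp only [Prod.mk.injEq, List.flatten_cons, List.append_assoc]
        and_intros <;> first | rfl | trivial | (rw [hlen]; ring)

-- A's inner loop started on a fresh run equals B's run-by-run scan of the flagged chunk list.
theorem pvInner_eq_runScan (S : PySem.Set (List Char)) :
    ∀ (N : Nat) (ws : List (List Char)), ws.length ≤ N → ∀ (b : Int) (t : List Char),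
      (ws.foldl (pvAStep S) (0, [], b, t)).2.2 =
        pvRunScan (ws.map (fun w => (PySem.Set.contains S w, w))) (b, t) := by
  intro N
  induction N with
  | zero =>
    intro ws hws b t
    have : ws = [] := List.length_eq_zero_iff.mp (Nat.le_zero.mp hws)
    subst this
    simp [pvRunScan_nil]
  | succ N ih =>
    intro ws hws b t
    cases ws with
    | nil => simp [pvRunScan_nil]
    | cons w tl =>
      have hwslen : tl.length ≤ N := by
        simp only [List.length_cons] at hws; omega
      set p : List Char → Bool := fun w => PySem.Set.contains S w with hp
      set F : List Char → Bool × List Char := fun w => (PySem.Set.contains S w, w) with hF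
      have hFmap : ∀ x, F x = (PySem.Set.contains S x, x) := fun x => by rw [hF]
      by_cases hw : PySem.Set.contains S w = true
      · -- a run starts here: split w :: tl into its leading block and the rest
        set blk : List (List Char) := w :: tl.takeWhile p with hblkdef
        set rest : List (List Char) := tl.dropWhile p with hrestdef
        have hsplit : blk ++ rest = w :: tl := by
          rw [hblkdef, hrestdef, List.cons_append, List.takeWhile_append_dropWhile]
        have hmem : ∀ x ∈ blk, PySem.Set.contains S x = true := by
          intro x hx
          rw [hblkdef] at hx
          rcases List.mem_cons.mp hx with h | h
          · subst h; exact hw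
          · have h2 := List.mem_takeWhile_imp h
            rw [hp] at h2
            exact h2
        have hblkne : blk ≠ [] := by simp [hblkdef]
        -- LHS: fold the block via pvAStep_block, then the rest
        have lhs1 : (w :: tl).foldl (pvAStep S) (0, [], b, t) =
            rest.foldl (pvAStep S) (blk.foldl (pvAStep S) (0, [], b, t)) := by
          conv_lhs => rw [← hsplit]
          rw [List.foldl_append]
        have hblkfold : blk.foldl (pvAStep S) (0, [], b, t) =
            ((blk.length : Int), blk.flatten,
             if b < (blk.length : Int) then (blk.length : Int) else b,
             if b < (blk.length : Int) then blk.flatten else t) := by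
          rw [pvAStep_block S blk hmem]
          have hsimp : (b < (blk.length : Int) ∧ blk ≠ []) ↔ b < (blk.length : Int) := by
            constructor
            · exact And.left
            · intro h; exact ⟨h, hblkne⟩
          simp only [zero_add, List.nil_append, hsimp]
        -- RHS: unfold pvRunScan once
        have hmap : (w :: tl).map F = (true, w) :: tl.map F := by
          rw [List.map_cons, hFmap w, hw]
        rw [hmap, pvRunScan_cons_true]
        have htwmap : (tl.map F).takeWhile (fun q => q.1) = (tl.takeWhile p).map F := by
          rw [List.takeWhile_map]
          rfl
        have hdwmap : (tl.map F).dropWhile (fun q => q.1) = rest.map F := by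
          rw [hrestdef, List.dropWhile_map]
          rfl
        rw [htwmap, hdwmap]
        have hcomp : ((fun q : Bool × List Char => q.2) ∘ F) = id := by
          funext x; rw [Function.comp_apply, hFmap x]; rfl
        have hlenblk : (((true, w) : Bool × List Char) :: (tl.takeWhile p).map F).length
            = blk.length := by
          rw [hblkdef]; simp
        have hsndblk : ((((true, w) : Bool × List Char) :: (tl.takeWhile p).map F).map
            (fun q => q.2)) = blk := by
          rw [List.map_cons, List.map_map, hcomp, List.map_id, hblkdef]
        rw [hlenblk, hsndblk]
        set B' : Int := if b < (blk.length : Int) then (blk.length : Int) else b with hB'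
        set T' : List Char := if b < (blk.length : Int) then blk.flatten else t with hT'
        have hst' : (if ((blk.length : Int)) > b then ((blk.length : Int), blk.flatten) else (b, t))
            = (B', T') := by
          by_cases hc : b < (blk.length : Int) <;> simp [hB', hT', hc, gt_iff_lt]
        rw [hst', lhs1, hblkfold]
        -- blk is nonempty, so rest is short enough for the induction hypothesis
        have hrest_len : rest.length ≤ N := by
          have h1 : rest.length ≤ tl.length := by
            rw [hrestdef]; exact List.length_dropWhile_le _ _
          omega
        cases hrest : rest with
        | nil => simp only [List.map_nil, List.foldl_nil, pvRunScan_nil]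
        | cons r rs =>
          -- the first element of rest fails the flag, so the run state resets
          have hd : tl.dropWhile p = r :: rs := hrestdef.symm.trans hrest
          have hne : tl.dropWhile p ≠ [] := by rw [hd]; exact List.cons_ne_nil r rs
          have hr0 := List.head_dropWhile_not p (l := tl) hne
          have hhead : (tl.dropWhile p).head hne = r := by
            have h1 : (tl.dropWhile p).head? = some r := by rw [hd]; rfl
            have h2 : (tl.dropWhile p).head? = some ((tl.dropWhile p).head hne) :=
              List.head?_eq_some_head hne
            exact Option.some.inj (h2.symm.trans h1)
          rw [hhead] at hr0
          have hrS : PySem.Set.contains S r = false := by rw [hp] at hr0; exact hr0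
          simp only [List.foldl_cons, List.map_cons]
          have hstep : pvAStep S ((blk.length : Int), blk.flatten, B', T') r = (0, [], B', T') := by
            unfold pvAStep
            rw [hrS]
            simp
          rw [hstep, hFmap r, hrS, pvRunScan_cons_false]
          have hrs_len : rs.length ≤ N := by
            have hlen2 : (r :: rs).length = rest.length := by rw [hrest]
            simp only [List.length_cons] at hlen2
            omega
          exact ih rs hrs_len B' T'
      · -- flag false: both sides skip this element
        have hwf : PySem.Set.contains S w = false := Bool.eq_false_iff.mpr hw
        have hstep : pvAStep S (0, [], b, t) w = (0, [], b, t) := by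
          unfold pvAStep
          rw [hwf]
          simp
        rw [List.foldl_cons, hstep, List.map_cons, hFmap w, hwf, pvRunScan_cons_false]
        exact ih tl hwslen b t

-- per offset: A's iteration equals B's table-then-scan iteration
theorem pvOff_eq (S : PySem.Set (List Char)) (cs : List Char) (L n : Int)
    (st : Int × List Char) (i : Int) : pvAOff S cs L n st i = pvBOff S cs L n st i := by
  unfold pvAOff pvBOff
  dsimp only
  rw [← List.foldl_map]
  set chunks := (PySem.List.pyRange i (n - L) L).map
    (fun j => PySem.List.slice cs (some j) (some (j + L))) with hchunks
  have hzip : (chunks.map (fun c => PySem.Set.contains S c)).zip chunks =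
      chunks.map (fun c => (PySem.Set.contains S c, c)) := by
    calc (chunks.map (fun c => PySem.Set.contains S c)).zip chunks
        = (chunks.map (fun c => PySem.Set.contains S c)).zip (chunks.map id) := by
          rw [List.map_id]
      _ = chunks.map (fun c => (PySem.Set.contains S c, id c)) := List.zip_map'
      _ = chunks.map (fun c => (PySem.Set.contains S c, c)) := rfl
  rw [hzip]
  exact pvInner_eq_runScan S chunks.length chunks (le_refl _) st.1 st.2

-- A's set-building loop equals B's set(listStr) (on the List Char side).
theorem pvSet_eq (listStr : List String) :
    (PySem.List.pyRange 0 (listStr.length : Int) 1).foldl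
        (fun s i => PySem.Set.add s (PySem.List.pyGetD listStr i "").toList) PySem.Set.empty
      = PySem.Set.ofList (listStr.map String.toList) := by
  rw [PySem.List.foldl_pyRange_zero_pyGetD' listStr ""
    (fun s x => PySem.Set.add s x.toList) PySem.Set.empty]
  rw [PySem.Set.ofList_eq_foldl, List.foldl_map]
  rfl

-- ===== VERDICT (by name: the statement is the Claim_ definition above) =====
theorem continguousString_spec : Claim_equal_continguousString := by
  intro listStr str _hdom hpre
  unfold Spec_continguousString continguousString continguousString_alt
  cases listStr with
  | nil => exact absurd rfl hpre
  | cons first rest0 =>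
    have hget : PySem.List.pyGet? (first :: rest0) 0 = some first := by
      simp [PySem.List.pyGet?, PySem.List.pyIdx?]
    rw [hget]
    dsimp only
    rw [pvSet_eq (first :: rest0)]
    have hfun : pvAOff (PySem.Set.ofList ((first :: rest0).map String.toList)) str.toList
          (PySem.Str.len first) (PySem.Str.len str)
        = pvBOff (PySem.Set.ofList ((first :: rest0).map String.toList)) str.toList
          (PySem.Str.len first) (PySem.Str.len str) :=
      funext fun st => funext fun i => pvOff_eq _ _ _ _ st i
    rw [hfun]
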